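-- pv_equiv track=rewrite | github.com/python-packaging/highlighter | highlighter/sdist.py | convert_sdist_requires
-- ===== SOURCE A (Python) =====
-- from typing import List
--
-- def convert_sdist_requires(data: str) -> List[str]:
--     # This is reverse engineered from looking at a couple examples, but there
--     # does not appear to be a formal spec.  Mentioned at
--     # https://setuptools.readthedocs.io/en/latest/formats.html#requires-txt
--     current_markers = None
--     lst: List[str] = []
--     for line in data.splitlines():
--         line = line.strip()
--         if not line:
--             continue
--         elif line[:1] == "[" and line[-1:] == "]":
--             current_markers = line[1:-1]
--             if ":" in current_markers:
--                 # absl-py==0.9.0 and requests==2.22.0 are good examples of this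
--                 extra, markers = current_markers.split(":", 1)
--                 if extra:
--                     current_markers = f"({markers}) and extra == {extra!r}"
--                 else:
--                     current_markers = markers
--             else:
--                 # this is an extras_require
--                 current_markers = f"extra == {current_markers!r}"
--         else:
--             if current_markers:
--                 lst.append(f"{line}; {current_markers}")
--             else:
--                 lst.append(line)
--     return lst
-- ===== SOURCE B (Python) =====
-- from typing import List, Optional, Tuple
--
--
-- def _marker_of(content: str) -> str:
--     # Translate one '[...]' header's bracket content into a marker string.
--     if ":" in content:
--         extra, markers = content.split(":", 1)
--         if extra:
--             return f"({markers}) and extra == {extra!r}"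
--         return markers
--     return f"extra == {content!r}"
--
--
-- def convert_sdist_requires(data: str) -> List[str]:
--     # Phase 1: segment the stripped, non-empty lines: a leading markerless
--     # segment, then one segment per '[...]' header line.
--     segments: List[Tuple[Optional[str], List[str]]] = [(None, [])]
--     for raw in data.splitlines():
--         line = raw.strip()
--         if not line:
--             continue
--         if line.startswith("[") and line.endswith("]"):
--             segments.append((line[1:-1], []))
--         else:
--             segments[-1][1].append(line)
--     # Phase 2: compute each segment's marker once and decorate its lines.
--     out: List[str] = []
--     for content, lines in segments:
--         marker = None if content is None else _marker_of(content)
--         if marker: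
--             out.extend(f"{line}; {marker}" for line in lines)
--         else:
--             out.extend(lines)
--     return out
-- ===== Notes on version B (the rewrite author's own statement) =====
-- stated objective: alternative
-- what changed: A's single pass threading a current_markers state through every line is replaced by a two-phase decomposition: first segment the stripped non-empty lines into a leading markerless segment plus one segment per bracket-header line, then compute each header's marker once and decorate/flatten the segments in order.
import Mathlib
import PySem

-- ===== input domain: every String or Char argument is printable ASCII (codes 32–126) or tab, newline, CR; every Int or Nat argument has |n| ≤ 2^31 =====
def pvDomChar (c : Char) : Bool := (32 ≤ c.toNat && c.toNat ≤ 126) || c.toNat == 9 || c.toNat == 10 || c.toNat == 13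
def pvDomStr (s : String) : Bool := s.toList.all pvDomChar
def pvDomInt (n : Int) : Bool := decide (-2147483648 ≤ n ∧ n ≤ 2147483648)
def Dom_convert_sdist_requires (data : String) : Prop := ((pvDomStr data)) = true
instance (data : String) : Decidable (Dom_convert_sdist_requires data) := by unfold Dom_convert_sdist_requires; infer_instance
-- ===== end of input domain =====

-- B re-decomposes A's single stateful pass into two phases (segment the lines at bracket
-- headers, then compute each header's marker once and decorate); same cost, objective: alternative.

-- Python's repr(s) for str, exact on the task domain (printable ASCII plus tab/newline/CR):
-- quote is '"' iff s contains "'" and no '"'; backslash, the quote, tab, newline, CR are escaped.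
def pyReprChars (cs : List Char) : List Char :=
  let q : Char := if cs.contains '\'' && !(cs.contains '"') then '"' else '\''
  [q] ++ (cs.flatMap (fun c =>
    if c = '\\' then ['\\', '\\']
    else if c = q then ['\\', q]
    else if c = '\t' then ['\\', 't']
    else if c = '\n' then ['\\', 'n']
    else if c = '\r' then ['\\', 'r']
    else [c])) ++ [q]

-- ===== PORT A =====
-- one step of A's loop; state = (current_markers, lst); `current_markers = None` is `none`,
-- Python's truthiness test `if current_markers:` is `st.1.getD [] ≠ []` (None and "" are falsy)
def pvStepA (st : Option (List Char) × List (List Char)) (raw : List Char) :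
    Option (List Char) × List (List Char) :=
  let line := PySem.Chars.strip raw
  if line = [] then st
  else if PySem.Chars.slice line none (some 1) = ['['] ∧
          PySem.Chars.slice line (some (-1)) none = [']'] then
    let cm := PySem.Chars.slice line (some 1) (some (-1))
    let cm :=
      if PySem.Chars.isIn [':'] cm then
        -- extra, markers = current_markers.split(":", 1): exactly two pieces since ':' occurs
        let parts := PySem.Chars.splitOnMax cm [':'] 1
        let extra := parts.getD 0 []
        let markers := parts.getD 1 []
        if extra ≠ [] then
          ['('] ++ markers ++ ") and extra == ".toList ++ pyReprChars extra
        else markers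
      else "extra == ".toList ++ pyReprChars cm
    (some cm, st.2)
  else
    if st.1.getD [] ≠ [] then
      (st.1, st.2 ++ [line ++ "; ".toList ++ st.1.getD []])
    else (st.1, st.2 ++ [line])

def convert_sdist_requires (data : String) : List String :=
  (((PySem.Chars.splitlines data.toList).foldl pvStepA (none, [])).2).map String.mk

-- ===== PORT B =====
-- _marker_of: one bracket header's content -> its marker string
def pvMarkerOf (content : List Char) : List Char :=
  if PySem.Chars.isIn [':'] content then
    let parts := PySem.Chars.splitOnMax content [':'] 1
    let extra := parts.getD 0 []
    let markers := parts.getD 1 []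
    if extra ≠ [] then
      ['('] ++ markers ++ ") and extra == ".toList ++ pyReprChars extra
    else markers
  else "extra == ".toList ++ pyReprChars content

-- phase 1: one step of the segmenting loop; `segments[-1][1].append(line)` is
-- rebuild-last (`dropLast ++ [...]`); the `none` match arm is unreachable (segments starts nonempty)
def pvStepB (segs : List (Option (List Char) × List (List Char))) (raw : List Char) :
    List (Option (List Char) × List (List Char)) :=
  let line := PySem.Chars.strip raw
  if line = [] then segs
  else if PySem.Chars.startswith line ['['] && PySem.Chars.endswith line [']'] then
    segs ++ [(some (PySem.Chars.slice line (some 1) (some (-1))), [])]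
  else
    match segs.getLast? with
    | some (h, ls) => segs.dropLast ++ [(h, ls ++ [line])]
    | none => segs

-- phase 2: decorate one segment's lines with its (once-computed) marker
def pvDecorate (seg : Option (List Char) × List (List Char)) : List (List Char) :=
  match seg.1 with
  | none => seg.2
  | some c =>
    let m := pvMarkerOf c
    if m ≠ [] then seg.2.map (fun l => l ++ "; ".toList ++ m) else seg.2

def convert_sdist_requires_alt (data : String) : List String :=
  (((PySem.Chars.splitlines data.toList).foldl pvStepB [(none, [])]).map pvDecorate).flatten.map
    String.mk

-- ===== PRECONDITION & SPEC =====
def Spec_convert_sdist_requires (data : String) (out : List String) : Prop := out = convert_sdist_requires_alt data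
instance (data : String) (out : List String) : Decidable (Spec_convert_sdist_requires data out) := by unfold Spec_convert_sdist_requires; infer_instance

-- ===== CLAIM (what is proved, stated in full; the proofs are below) =====
def Claim_equal_convert_sdist_requires : Prop := ∀ (data : String), Dom_convert_sdist_requires data → Spec_convert_sdist_requires data (convert_sdist_requires data)

-- ===== LEMMAS AND PROOFS =====

lemma take_one_eq_iff (l : List Char) (c : Char) : l.take 1 = [c] ↔ l.head? = some c := by
  cases l <;> simp

lemma prefix_singleton_iff (l : List Char) (c : Char) : [c] <+: l ↔ l.head? = some c := by
  cases l with
  | nil => simp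
  | cons a t => simp [List.cons_prefix_cons, eq_comm]

lemma drop_pred_eq_iff (l : List Char) (c : Char) :
    l.drop (l.length - 1) = [c] ↔ l.getLast? = some c := by
  induction l with
  | nil => simp
  | cons a t ih =>
    cases t with
    | nil => simp
    | cons b u =>
      simpa using ih

lemma suffix_singleton_iff (l : List Char) (c : Char) : [c] <:+ l ↔ l.getLast? = some c := by
  have h := prefix_singleton_iff l.reverse c
  rw [List.head?_reverse] at h
  rw [← h, ← List.reverse_prefix]
  simp

-- A's header test (line[:1]=="[" and line[-1:]=="]") agrees with B's startswith/endswith test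
lemma header_iff (line : List Char) :
    (PySem.Chars.slice line none (some 1) = ['['] ∧
      PySem.Chars.slice line (some (-1)) none = [']']) ↔
    (PySem.Chars.startswith line ['['] && PySem.Chars.endswith line [']']) = true := by
  rw [Bool.and_eq_true, PySem.Chars.startswith_iff, PySem.Chars.endswith_iff]
  have h1 : PySem.Chars.slice line none (some 1) = line.take 1 := by simp [pysem]
  have h2 : PySem.Chars.slice line (some (-1)) none = line.drop (line.length - 1) := by
    simp [pysem]
  rw [h1, h2, take_one_eq_iff, drop_pred_eq_iff, prefix_singleton_iff, suffix_singleton_iff]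

lemma decorate_nil (h : Option (List Char)) : pvDecorate (h, []) = [] := by
  cases h <;> simp [pvDecorate]

-- decorating a segment distributes over appending one line, matching A's in-loop append
lemma decorate_snoc (h : Option (List Char)) (ls : List (List Char)) (line : List Char) :
    pvDecorate (h, ls ++ [line]) =
      pvDecorate (h, ls) ++
        (if (h.map pvMarkerOf).getD [] ≠ [] then
          [line ++ "; ".toList ++ (h.map pvMarkerOf).getD []] else [line]) := by
  cases h with
  | none => simp [pvDecorate]
  | some c =>
    by_cases hm : pvMarkerOf c = [] <;> simp [pvDecorate, hm]

-- loop invariant: B's segment list flattens to A's accumulator, B's last header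
-- determines A's current_markers (via pvMarkerOf)
lemma key (lines : List (List Char)) :
    ∀ (pre : List (Option (List Char) × List (List Char))) (h : Option (List Char))
      (ls : List (List Char)),
    ((List.foldl pvStepB (pre ++ [(h, ls)]) lines).map pvDecorate).flatten =
      (List.foldl pvStepA
        (h.map pvMarkerOf, (pre.map pvDecorate).flatten ++ pvDecorate (h, ls)) lines).2 := by
  induction lines with
  | nil => intro pre h ls; simp
  | cons raw rest ih =>
    intro pre h ls
    rw [List.foldl_cons, List.foldl_cons]
    by_cases hemp : PySem.Chars.strip raw = []
    · rw [show pvStepB (pre ++ [(h, ls)]) raw = pre ++ [(h, ls)] by simp [pvStepB, hemp],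
        show ∀ st, pvStepA st raw = st by intro st; simp [pvStepA, hemp]]
      exact ih pre h ls
    · by_cases hhd : (PySem.Chars.startswith (PySem.Chars.strip raw) ['['] &&
          PySem.Chars.endswith (PySem.Chars.strip raw) [']']) = true
      · have hA := (header_iff (PySem.Chars.strip raw)).mpr hhd
        have hB : pvStepB (pre ++ [(h, ls)]) raw =
            (pre ++ [(h, ls)]) ++
              [(some (PySem.Chars.slice (PySem.Chars.strip raw) (some 1) (some (-1))), [])] := by
          simp [pvStepB, hemp, hhd]
        have hA' : ∀ st : Option (List Char) × List (List Char), pvStepA st raw =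
            (some (pvMarkerOf (PySem.Chars.slice (PySem.Chars.strip raw) (some 1) (some (-1)))),
              st.2) := by
          intro st
          simp only [pvStepA, if_neg hemp, if_pos hA, pvMarkerOf]
        rw [hB, hA']
        have := ih (pre ++ [(h, ls)])
          (some (PySem.Chars.slice (PySem.Chars.strip raw) (some 1) (some (-1)))) []
        rw [this]
        simp [decorate_nil]
      · have hA : ¬ (PySem.Chars.slice (PySem.Chars.strip raw) none (some 1) = ['['] ∧
            PySem.Chars.slice (PySem.Chars.strip raw) (some (-1)) none = [']']) := by
          rw [header_iff]; exact hhd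
        simp only [PySem.Chars.slice_eq_listSlice] at hA
        have hB : pvStepB (pre ++ [(h, ls)]) raw =
            pre ++ [(h, ls ++ [PySem.Chars.strip raw])] := by
          simp [pvStepB, hemp, hhd]
        rw [hB, ih pre h (ls ++ [PySem.Chars.strip raw])]
        have hst : pvStepA
              (h.map pvMarkerOf, (pre.map pvDecorate).flatten ++ pvDecorate (h, ls)) raw =
            (h.map pvMarkerOf,
              (pre.map pvDecorate).flatten ++ pvDecorate (h, ls ++ [PySem.Chars.strip raw])) := by
          rw [decorate_snoc]
          by_cases hcm : (h.map pvMarkerOf).getD [] ≠ [] <;>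
            simp [pvStepA, hemp, hA, hcm, List.append_assoc]
        rw [hst]

-- ===== VERDICT (by name: the statement is the Claim_ definition above) =====
theorem convert_sdist_requires_spec : Claim_equal_convert_sdist_requires := by
  intro data _
  show convert_sdist_requires data = convert_sdist_requires_alt data
  unfold convert_sdist_requires convert_sdist_requires_alt
  have := key (PySem.Chars.splitlines data.toList) [] none []
  simp only [List.nil_append, List.map_nil, List.flatten_nil, decorate_nil,
    List.append_nil, Option.map_none] at this
  rw [this]
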